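-- pv_equiv track=rewrite | github.com/CrisCanapi730/aprendiendo-python | Listas/Ejercicios/funcion_sin_repetidos.py | fusionar_listas
-- ===== SOURCE A (Python) =====
-- def fusionar_listas(lista_1, lista_2):
--     contador = 0
--     lista_1.extend(lista_2)
--     lista_1.sort()
--     respuesta = []
--     repetidos = []
--     for num in lista_1:
--         if num not in respuesta:
--             respuesta.append(num)
--
--         elif num not in repetidos:
--             contador+=1
--             repetidos.append(num)
--
--     return respuesta, contador
-- ===== SOURCE B (Python) =====
-- def fusionar_listas(lista_1, lista_2):
--     # Note: unlike A, this does not mutate lista_1 (the return value is identical).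
--     counts = {}
--     for num in lista_1:
--         counts[num] = counts.get(num, 0) + 1
--     for num in lista_2:
--         counts[num] = counts.get(num, 0) + 1
--     respuesta = sorted(counts)
--     contador = sum(1 for v in counts.values() if v >= 2)
--     return respuesta, contador
-- ===== Notes on version B (the rewrite author's own statement) =====
-- stated objective: faster
-- what changed: Replaces A's sort of the merged list plus two O(n) membership scans per element by a hash-map frequency count over both lists, sorting only the distinct keys and counting keys with multiplicity >= 2.
import Mathlib
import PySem

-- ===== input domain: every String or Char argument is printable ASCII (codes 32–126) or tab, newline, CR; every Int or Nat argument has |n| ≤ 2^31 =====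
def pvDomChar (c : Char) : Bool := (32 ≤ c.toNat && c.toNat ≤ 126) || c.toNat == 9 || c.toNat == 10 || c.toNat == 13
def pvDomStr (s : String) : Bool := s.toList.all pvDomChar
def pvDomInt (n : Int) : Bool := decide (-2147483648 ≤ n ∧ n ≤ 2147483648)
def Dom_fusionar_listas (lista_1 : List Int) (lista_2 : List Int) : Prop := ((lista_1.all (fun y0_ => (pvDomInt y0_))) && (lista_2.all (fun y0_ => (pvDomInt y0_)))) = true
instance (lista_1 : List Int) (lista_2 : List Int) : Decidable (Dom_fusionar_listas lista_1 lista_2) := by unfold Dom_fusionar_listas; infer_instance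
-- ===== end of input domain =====

-- B replaces A's sort-then-quadratic-membership-scans by a frequency dictionary (sort only the
-- distinct keys, count keys of multiplicity ≥ 2); objective: faster. Equivalence is about the
-- RETURN value only: the Python A mutates lista_1 in place (extend + sort); B does not.

-- ===== PORT A =====
-- A's loop over the sorted fused list, carrying (respuesta, repetidos, contador)
def fusionarLoopA : List Int → List Int → List Int → Int → List Int × Int
  | [], resp, _, c => (resp, c)
  | n :: t, resp, reps, c =>
    if n ∉ resp then fusionarLoopA t (resp ++ [n]) reps c
    else if n ∉ reps then fusionarLoopA t resp (reps ++ [n]) (c + 1)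
    else fusionarLoopA t resp reps c

def fusionar_listas (lista_1 : List Int) (lista_2 : List Int) : List Int × Int :=
  -- lista_1.extend(lista_2); lista_1.sort()
  let fused := PySem.List.sorted (lista_1 ++ lista_2) (fun x => x) false
  fusionarLoopA fused [] [] 0

-- ===== PORT B =====
-- counts[num] = counts.get(num, 0) + 1 over one list
def countLoopB (d : PySem.Dict Int Int) (xs : List Int) : PySem.Dict Int Int :=
  xs.foldl (fun d n => d.insert n (d.getD n 0 + 1)) d

def fusionar_listas_alt (lista_1 : List Int) (lista_2 : List Int) : List Int × Int :=
  -- respuesta = sorted(counts); contador = sum(1 for v in counts.values() if v >= 2)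
  (PySem.List.sorted (countLoopB (countLoopB PySem.Dict.empty lista_1) lista_2).keys (fun x => x) false,
   (countLoopB (countLoopB PySem.Dict.empty lista_1) lista_2).values.foldl
     (fun c v => if 2 ≤ v then c + 1 else c) 0)

-- ===== PRECONDITION & SPEC =====
def Spec_fusionar_listas (lista_1 : List Int) (lista_2 : List Int) (out : List Int × Int) : Prop := out = fusionar_listas_alt lista_1 lista_2
instance (lista_1 : List Int) (lista_2 : List Int) (out : List Int × Int) : Decidable (Spec_fusionar_listas lista_1 lista_2 out) := by unfold Spec_fusionar_listas; infer_instance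

-- ===== CLAIM (what is proved, stated in full; the proofs are below) =====
def Claim_equal_fusionar_listas : Prop := ∀ (lista_1 : List Int) (lista_2 : List Int), Dom_fusionar_listas lista_1 lista_2 → Spec_fusionar_listas lista_1 lista_2 (fusionar_listas lista_1 lista_2)

-- ===== LEMMAS AND PROOFS =====

-- Adjacent dedup of a sorted list, phrased as a left fold (so it unfolds over `p ++ [n]`).
def dd (p : List Int) : List Int :=
  p.foldl (fun acc n => if acc.getLast? = some n then acc else acc ++ [n]) []

-- The repeated values seen so far, in respuesta order.
def rr (p : List Int) : List Int := (dd p).filter (fun n => 2 ≤ p.count n)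

lemma dd_append (p : List Int) (n : Int) :
    dd (p ++ [n]) = if (dd p).getLast? = some n then dd p else dd p ++ [n] := by
  simp [dd, List.foldl_append]

-- last element of a ≤-sorted list containing its upper bound n is n
lemma getLast?_of_max (p : List Int) (hs : p.Pairwise (· ≤ ·)) (n : Int)
    (hn : n ∈ p) (hmax : ∀ y ∈ p, y ≤ n) : p.getLast? = some n := by
  induction p with
  | nil => simp at hn
  | cons a t ih =>
    cases t with
    | nil => simp at hn ⊢; have := hmax a (by simp); omega
    | cons b r =>
      rw [List.getLast?_cons_cons]
      rcases List.pairwise_cons.mp hs with ⟨ha, ht⟩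
      apply ih ht
      · rcases List.mem_cons.mp hn with rfl | h
        · have h1 := ha b (by simp)
          have h2 := hmax b (by simp)
          have : b = n := le_antisymm h2 h1
          simp [← this]
        · exact h
      · intro y hy; exact hmax y (List.mem_cons_of_mem _ hy)

-- dd of a sorted list: strictly increasing, same members, same last element
lemma dd_props (p : List Int) (hs : p.Pairwise (· ≤ ·)) :
    (dd p).Pairwise (· < ·) ∧ (∀ x, x ∈ dd p ↔ x ∈ p) ∧ (dd p).getLast? = p.getLast? := by
  induction p using List.reverseRecOn with
  | nil => simp [dd]
  | append_singleton p n ih =>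
    rcases List.pairwise_append.mp hs with ⟨hp, _, hle⟩
    have hle' : ∀ y ∈ p, y ≤ n := fun y hy => hle y hy n (by simp)
    obtain ⟨ihlt, ihmem, ihlast⟩ := ih hp
    rw [dd_append]
    by_cases hl : (dd p).getLast? = some n
    · have hnp : n ∈ p := (ihmem n).mp (List.mem_of_getLast? hl)
      simp only [if_pos hl]
      refine ⟨ihlt, ?_, ?_⟩
      · intro x
        rw [ihmem x, List.mem_append]
        constructor
        · exact Or.inl
        · rintro (h | h)
          · exact h
          · simp at h; exact h ▸ hnp
      · rw [hl, List.getLast?_concat]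
    · have hnin : n ∉ dd p := by
        intro hmem
        have hnp : n ∈ p := (ihmem n).mp hmem
        exact hl (ihlast ▸ getLast?_of_max p hp n hnp hle')
      simp only [if_neg hl]
      refine ⟨?_, ?_, ?_⟩
      · rw [List.pairwise_append]
        refine ⟨ihlt, by simp, ?_⟩
        intro y hy z hz
        simp at hz; subst hz
        have : y ≤ z := hle' y ((ihmem y).mp hy)
        exact lt_of_le_of_ne this (fun h => hnin (h ▸ hy))
      · intro x; rw [List.mem_append, List.mem_append, ihmem x]
      · rw [List.getLast?_concat, List.getLast?_concat]

-- main invariant: A's loop over the remaining sorted suffix t, started from the state that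
-- processing the sorted prefix p produces, computes dd / rr of the whole list
lemma loopA_gen : ∀ (t p : List Int) (c : Int), (p ++ t).Pairwise (· ≤ ·) →
    fusionarLoopA t (dd p) (rr p) (c + ((rr p).length : Int))
      = (dd (p ++ t), c + ((rr (p ++ t)).length : Int)) := by
  intro t
  induction t with
  | nil => intro p c _; simp [fusionarLoopA]
  | cons n t' ih =>
    intro p c hs
    have hs' : (p ++ [n] ++ t').Pairwise (· ≤ ·) := by simpa using hs
    have hpn : (p ++ [n]).Pairwise (· ≤ ·) := (List.pairwise_append.mp hs').1
    have hp : p.Pairwise (· ≤ ·) := (List.pairwise_append.mp hpn).1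
    have hle' : ∀ y ∈ p, y ≤ n := by
      have := (List.pairwise_append.mp hpn).2.2
      intro y hy; exact this y hy n (by simp)
    obtain ⟨hlt, hmem, hlast⟩ := dd_props p hp
    have hassoc : p ++ n :: t' = (p ++ [n]) ++ t' := by simp
    by_cases hnp : n ∈ p
    · -- n already in respuesta; it is the last element of dd p
      have hlastp : p.getLast? = some n := getLast?_of_max p hp n hnp hle'
      have hddlast : (dd p).getLast? = some n := hlast ▸ hlastp
      have hnd : n ∈ dd p := (hmem n).mpr hnp
      have hddsame : dd (p ++ [n]) = dd p := by rw [dd_append, if_pos hddlast]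
      -- dd p = q ++ [n] with n ∉ q
      have hsplit : dd p = (dd p).dropLast ++ [n] :=
        (List.dropLast_append_getLast? n hddlast).symm
      set q := (dd p).dropLast with hq
      have hnq : n ∉ q := by
        intro hmemq
        have : (q ++ [n]).Pairwise (· < ·) := hsplit ▸ hlt
        rcases List.pairwise_append.mp this with ⟨_, _, hrel⟩
        exact lt_irrefl n (hrel n hmemq n (by simp))
      have hqcount : ∀ x ∈ q, (p ++ [n]).count x = p.count x := by
        intro x hx
        have hxn : ¬ (n = x) := fun h => hnq (by rw [h]; exact hx)
        simp [List.count_append, hxn]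
      have hqfilter : q.filter (fun x => decide (2 ≤ (p ++ [n]).count x))
          = q.filter (fun x => decide (2 ≤ p.count x)) :=
        List.filter_congr (fun x hx => by rw [hqcount x hx])
      by_cases hrep : n ∈ rr p
      · -- count p n ≥ 2 already: loop skips, state unchanged
        have hc2 : 2 ≤ p.count n := by
          have := List.of_mem_filter hrep
          simpa using this
        have hrrsame : rr (p ++ [n]) = rr p := by
          unfold rr
          rw [hddsame]
          conv_lhs => rw [hsplit]
          conv_rhs => rw [hsplit]
          rw [List.filter_append, List.filter_append, hqfilter]
          congr 1
          have e2 : (p ++ [n]).count n = p.count n + 1 := by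
            simp [List.count_append]
          simp [hc2]
          exact hnp
        have estep : fusionarLoopA (n :: t') (dd p) (rr p) (c + ((rr p).length : Int))
            = fusionarLoopA t' (dd p) (rr p) (c + ((rr p).length : Int)) := by
          simp [fusionarLoopA, hnd, hrep]
        rw [estep, hassoc]
        have hrec := ih (p ++ [n]) c (by simpa using hs')
        rw [hddsame, hrrsame] at hrec
        exact hrec
      · -- first repetition of n: contador += 1, repetidos.append(n)
        have hc1 : p.count n = 1 := by
          have hge : 1 ≤ p.count n := List.one_le_count_iff.mpr hnp
          by_contra h
          exact hrep (List.mem_filter.mpr ⟨hnd, by simp; omega⟩)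
        have hrrnew : rr (p ++ [n]) = rr p ++ [n] := by
          unfold rr
          rw [hddsame]
          conv_lhs => rw [hsplit]
          conv_rhs => rw [hsplit]
          rw [List.filter_append, List.filter_append, hqfilter, List.append_assoc]
          congr 1
          have e2 : (p ++ [n]).count n = 2 := by
            simp [List.count_append, hc1]
          simp [hc1]
        have estep : fusionarLoopA (n :: t') (dd p) (rr p) (c + ((rr p).length : Int))
            = fusionarLoopA t' (dd p) (rr p ++ [n]) (c + ((rr p).length : Int) + 1) := by
          simp [fusionarLoopA, hnd, hrep]
        rw [estep, hassoc]
        have hrec := ih (p ++ [n]) c (by simpa using hs')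
        rw [hddsame, hrrnew] at hrec
        have hlen : ((rr p ++ [n]).length : Int) = ((rr p).length : Int) + 1 := by
          simp
        rw [hlen, ← add_assoc] at hrec
        exact hrec
    · -- new value: respuesta.append(n)
      have hnd : n ∉ dd p := fun h => hnp ((hmem n).mp h)
      have hddnew : dd (p ++ [n]) = dd p ++ [n] := by
        rw [dd_append, if_neg]
        intro h
        exact hnp (List.mem_of_getLast? (hlast ▸ h))
      have hrrsame : rr (p ++ [n]) = rr p := by
        unfold rr
        rw [hddnew, List.filter_append]
        have h1 : (dd p).filter (fun x => decide (2 ≤ (p ++ [n]).count x))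
            = (dd p).filter (fun x => decide (2 ≤ p.count x)) := by
          apply List.filter_congr
          intro x hx
          have hxn : ¬ (n = x) := fun h => hnd (by rw [h]; exact hx)
          simp [List.count_append, hxn]
        have h2 : ([n] : List Int).filter (fun x => decide (2 ≤ (p ++ [n]).count x)) = [] := by
          have : p.count n = 0 := List.count_eq_zero.mpr hnp
          simp [List.count_append, this]
        rw [h1, h2, List.append_nil]
      have estep : fusionarLoopA (n :: t') (dd p) (rr p) (c + ((rr p).length : Int))
          = fusionarLoopA t' (dd p ++ [n]) (rr p) (c + ((rr p).length : Int)) := by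
        simp [fusionarLoopA, hnd]
      rw [estep, hassoc]
      have hrec := ih (p ++ [n]) c (by simpa using hs')
      rw [hddnew, hrrsame] at hrec
      exact hrec

-- A's result, characterised: (adjacent dedup of the sorted merge, number of values of count ≥ 2)
lemma fusionar_listas_eq (l1 l2 : List Int) :
    fusionar_listas l1 l2
      = (dd (PySem.List.sorted (l1 ++ l2) (fun x => x) false),
         ((rr (PySem.List.sorted (l1 ++ l2) (fun x => x) false)).length : Int)) := by
  unfold fusionar_listas
  have h := loopA_gen (PySem.List.sorted (l1 ++ l2) (fun x => x) false) [] 0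
    (by simpa using PySem.List.sorted_pairwise (l1 ++ l2) (fun x => x))
  have hdd : dd ([] : List Int) = [] := rfl
  have hrr : rr ([] : List Int) = [] := rfl
  rw [hdd, hrr, List.nil_append] at h
  simpa using h

-- B's dictionary is Counter(l1 ++ l2)
lemma countLoopB_eq (l1 l2 : List Int) :
    countLoopB (countLoopB PySem.Dict.empty l1) l2 = PySem.Dict.counter (l1 ++ l2) := by
  unfold countLoopB
  rw [← List.foldl_append, PySem.Dict.foldl_insert_getD_add_one_eq_counter]

-- ===== VERDICT (by name: the statement is the Claim_ definition above) =====
theorem fusionar_listas_spec : Claim_equal_fusionar_listas := by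
  intro l1 l2 _
  unfold Spec_fusionar_listas
  rw [fusionar_listas_eq]
  unfold fusionar_listas_alt
  rw [countLoopB_eq]
  set m := l1 ++ l2 with hm
  set s := PySem.List.sorted m (fun x => x) false with hsdef
  have hsp : s.Pairwise (· ≤ ·) := by
    simpa using PySem.List.sorted_pairwise m (fun x => x)
  obtain ⟨hlt, hmem, _⟩ := dd_props s hsp
  have hsperm : s.Perm m := PySem.List.sorted_perm m (fun x => x) false
  have hkeys : (PySem.Dict.counter m).keys = PySem.Set.ofList m := PySem.Dict.keys_counter m
  have hknd : (PySem.Dict.counter m).keys.Nodup := PySem.Dict.nodup_keys_counter m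
  have hddnd : (dd s).Nodup := hlt.imp (fun {a b} hab => ne_of_lt hab)
  have hkmem : ∀ x, x ∈ (PySem.Dict.counter m).keys ↔ x ∈ dd s := by
    intro x
    rw [hkeys, PySem.Set.mem_ofList, hmem x, ← hsperm.mem_iff]
  have hkperm : (PySem.Dict.counter m).keys.Perm (dd s) :=
    (List.perm_ext_iff_of_nodup hknd hddnd).mpr hkmem
  refine Prod.ext_iff.mpr ⟨?_, ?_⟩
  · -- sorted keys = dd s
    exact (PySem.List.eq_of_perm_of_pairwise_le_of_injective (fun x => x)
      (fun a b h => h)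
      ((PySem.List.sorted_perm _ _ _).trans hkperm)
      (by simpa using PySem.List.sorted_pairwise (PySem.Dict.counter m).keys (fun x => x))
      (hlt.imp (fun {a b} hab => le_of_lt hab))).symm
  · -- contador: both count the values of multiplicity ≥ 2
    show ((rr s).length : Int)
        = (PySem.Dict.counter m).values.foldl (fun c v => if 2 ≤ v then c + 1 else c) 0
    rw [PySem.Dict.values_eq_map_keys (PySem.Dict.counter m) hknd 0]
    rw [PySem.List.foldl_ite_add_one]
    rw [List.countP_map]
    have hcong : (PySem.Dict.counter m).keys.countP
          ((fun v => decide (2 ≤ v)) ∘ fun k => (PySem.Dict.counter m).getD k 0)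
        = (PySem.Dict.counter m).keys.countP (fun x => decide (2 ≤ s.count x)) := by
      apply List.countP_congr
      intro x _
      have hg : (PySem.Dict.counter m).getD x 0 = (m.count x : Int) :=
        PySem.Dict.getD_counter m x
      simp [Function.comp, hg, hsperm.count_eq]
    rw [hcong, hkperm.countP_eq]
    unfold rr
    rw [← List.countP_eq_length_filter]
    omega
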